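-- pv_equiv track=rewrite | github.com/Milko-B/advent-of-code | 2025/Day3a.py | find_highest_joltage
-- ===== SOURCE A (Python) =====
-- def find_highest_joltage(row : list[int]) -> int:
--     battery_1 = 0
--     battery_2 = 0
--
--     row_size = len(row)
--
--     for index, value in enumerate(row):
--         if battery_1 < value and index != row_size - 1:
--             battery_1 = value
--             battery_2 = 0
--             continue
--
--         if battery_2 < value:
--             battery_2 = value
--
--     return battery_1 * 10 + battery_2
-- ===== SOURCE B (Python) =====
-- def find_highest_joltage(row: list[int]) -> int:
--     if not row:
--         return 0
--     front, last = row[:-1], row[-1]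
--     battery_1 = max([0] + front)
--     if battery_1 > 0:
--         tail = front[front.index(battery_1) + 1:]
--     else:
--         tail = front
--     battery_2 = max([0, last] + tail)
--     return battery_1 * 10 + battery_2
-- ===== Notes on version B (the rewrite author's own statement) =====
-- stated objective: alternative
-- what changed: B replaces A's interleaved single-pass state machine by a split-and-scan decomposition: compute battery_1 as the max of row[:-1] clamped at 0, locate its first occurrence with list.index, then take battery_2 as the max over the suffix after that point together with the last element.
import Mathlib
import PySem

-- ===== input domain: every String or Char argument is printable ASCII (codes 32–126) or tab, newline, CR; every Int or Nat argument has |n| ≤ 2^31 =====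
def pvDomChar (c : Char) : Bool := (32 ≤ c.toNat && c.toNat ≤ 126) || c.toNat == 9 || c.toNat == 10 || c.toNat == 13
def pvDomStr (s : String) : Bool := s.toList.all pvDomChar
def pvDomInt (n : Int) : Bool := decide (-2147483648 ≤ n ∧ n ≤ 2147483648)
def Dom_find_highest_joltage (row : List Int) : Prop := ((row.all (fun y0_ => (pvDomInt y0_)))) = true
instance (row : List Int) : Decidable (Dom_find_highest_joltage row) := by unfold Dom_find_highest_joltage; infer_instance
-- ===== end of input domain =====

-- B replaces A's interleaved one-pass state machine by a split/index/suffix-scan decomposition (same O(n) cost).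


-- ===== PORT A =====
-- loop body of A, with n = len(row)
def stepA (n : Int) (st : Int × Int) (iv : Int × Int) : Int × Int :=
  if st.1 < iv.2 ∧ iv.1 ≠ n - 1 then (iv.2, 0)
  else if st.2 < iv.2 then (st.1, iv.2)
  else st

def find_highest_joltage (row : List Int) : Int :=
  let st := (PySem.List.enumerate row).foldl (stepA (row.length : Int)) (0, 0)
  st.1 * 10 + st.2

-- ===== PORT B =====
def find_highest_joltage_alt (row : List Int) : Int :=
  if row = [] then 0
  else
    let front := PySem.List.slice row none (some (-1))      -- row[:-1]
    let last := PySem.List.pyGetD row (-1) 0                -- row[-1] (row nonempty)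
    let battery_1 := front.foldl max 0                      -- max([0] + front)
    let tail :=
      if battery_1 > 0 then
        match PySem.List.index? front battery_1 with
        | some p => PySem.List.slice front (some ((p : Int) + 1)) none   -- front[p+1:]
        | none => []                                        -- unreachable: battery_1 ∈ front
      else front
    let battery_2 := tail.foldl max (max 0 last)            -- max([0, last] + tail)
    battery_1 * 10 + battery_2

-- ===== PRECONDITION & SPEC =====
def Spec_find_highest_joltage (row : List Int) (out : Int) : Prop := out = find_highest_joltage_alt row
instance (row : List Int) (out : Int) : Decidable (Spec_find_highest_joltage row out) := by unfold Spec_find_highest_joltage; infer_instance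

-- ===== CLAIM (what is proved, stated in full; the proofs are below) =====
def Claim_equal_find_highest_joltage : Prop := ∀ (row : List Int), Dom_find_highest_joltage row → Spec_find_highest_joltage row (find_highest_joltage row)

-- ===== LEMMAS AND PROOFS =====

-- A's loop body at a non-final position (index ≠ n-1 known true)
def stepMid (st : Int × Int) (v : Int) : Int × Int :=
  if st.1 < v then (v, 0)
  else if st.2 < v then (st.1, v)
  else st

lemma foldl_max_max (l : List Int) : ∀ a b : Int, l.foldl max (max a b) = max (l.foldl max a) b := by
  induction l with
  | nil => intro a b; rfl
  | cons v t ih =>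
    intro a b
    simpa [List.foldl_cons, max_right_comm a b v] using ih (max a v) b

-- A's loop over front (all indices ≠ n-1), then the final element z (index = n-1)
lemma A_fold (n : Int) (front : List Int) (z : Int) :
    ∀ (s : Int) (st : Int × Int), s + front.length + 1 = n →
    (PySem.List.enumerate (front ++ [z]) s).foldl (stepA n) st =
      (if (front.foldl stepMid st).2 < z
       then ((front.foldl stepMid st).1, z)
       else front.foldl stepMid st) := by
  induction front with
  | nil =>
    intro s st hs
    simp only [List.length_nil] at hs
    have hsn : s = n - 1 := by omega
    subst hsn
    simp [PySem.List.enumerate_cons, PySem.List.enumerate_nil, stepA]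
  | cons v t ih =>
    intro s st hs
    have hne : s ≠ n - 1 := by
      simp only [List.length_cons] at hs; push_cast at hs; omega
    have hstep : stepA n st (s, v) = stepMid st v := by
      simp [stepA, stepMid, hne]
    rw [List.cons_append, PySem.List.enumerate_cons, List.foldl_cons, hstep,
        ih (s + 1) (stepMid st v)
          (by simp only [List.length_cons] at hs ⊢; push_cast at hs ⊢; omega),
        List.foldl_cons]

-- characterization of A's loop state after the non-final part
lemma mid_char (l : List Int) :
    ∀ (b1 b2 : Int), 0 ≤ b2 → b2 ≤ b1 →
    l.foldl stepMid (b1, b2) =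
      (l.foldl max b1,
       if b1 < l.foldl max b1 then
         (match PySem.List.index? l (l.foldl max b1) with
          | some p => (l.drop (p + 1)).foldl max 0
          | none => 0)
       else l.foldl max b2) := by
  induction l with
  | nil =>
    intro b1 b2 _ _
    simp [List.foldl]
  | cons v t ih =>
    intro b1 b2 h0 h21
    by_cases h : b1 < v
    · have hstep : stepMid (b1, b2) v = (v, 0) := by simp [stepMid, h]
      rw [List.foldl_cons, hstep, ih v 0 le_rfl (by omega), List.foldl_cons,
          show max b1 v = v by omega]
      set M := t.foldl max v with hM
      have hvM : v ≤ M := (PySem.List.le_foldl_max t v).1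
      have hb1M : b1 < M := lt_of_lt_of_le h hvM
      by_cases hvEq : v = M
      · have hnv : ¬ v < M := by omega
        have hidx : PySem.List.index? (v :: t) M = some 0 := by
          rw [hvEq]; exact PySem.List.index?_cons_self M t
        rw [if_neg hnv, if_pos hb1M, hidx]
        rfl
      · have hvlt : v < M := lt_of_le_of_ne hvM hvEq
        have hmem : M ∈ t := by
          rcases PySem.List.foldl_max_mem t v with h1 | h1
          · exact absurd h1.symm hvEq
          · exact h1
        obtain ⟨q, hq⟩ :=
          Option.isSome_iff_exists.mp ((PySem.List.index?_isSome_iff t M).mpr hmem)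
        have hidx : PySem.List.index? (v :: t) M = some (q + 1) := by
          rw [PySem.List.index?_cons_of_ne t hvEq, hq]; rfl
        rw [if_pos hvlt, if_pos hb1M, hidx, hq]
        rfl
    · have hstep : stepMid (b1, b2) v = (b1, max b2 v) := by
        simp only [stepMid, if_neg h]
        split_ifs with h2
        · simp [max_eq_right (le_of_lt h2)]
        · simp [max_eq_left (by omega : v ≤ b2)]
      rw [List.foldl_cons, hstep, ih b1 (max b2 v) (by omega) (by omega), List.foldl_cons,
          show max b1 v = b1 by omega]
      set M := t.foldl max b1 with hM
      by_cases hb1M : b1 < M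
      · have hvne : v ≠ M := by omega
        have hmem : M ∈ t := by
          rcases PySem.List.foldl_max_mem t b1 with h1 | h1
          · omega
          · exact h1
        obtain ⟨q, hq⟩ :=
          Option.isSome_iff_exists.mp ((PySem.List.index?_isSome_iff t M).mpr hmem)
        have hidx : PySem.List.index? (v :: t) M = some (q + 1) := by
          rw [PySem.List.index?_cons_of_ne t hvne, hq]; rfl
        rw [if_pos hb1M, if_pos hb1M, hidx, hq]
        rfl
      · rw [if_neg hb1M, if_neg hb1M]
        rfl

-- ===== VERDICT (by name: the statement is the Claim_ definition above) =====
theorem find_highest_joltage_spec : Claim_equal_find_highest_joltage := by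
  intro row _
  unfold Spec_find_highest_joltage
  rcases List.eq_nil_or_concat row with rfl | ⟨front, z, rfl⟩
  · simp [find_highest_joltage, find_highest_joltage_alt, PySem.List.enumerate_nil]
  · simp only [List.concat_eq_append]
    have hne : front ++ [z] ≠ [] := by simp
    unfold find_highest_joltage find_highest_joltage_alt
    rw [if_neg hne,
        A_fold ((front ++ [z]).length : Int) front z 0 (0, 0) (by simp)]
    simp only [PySem.List.slice_to_neg_one, List.dropLast_concat,
      PySem.List.pyGetD_neg_one_append_singleton]
    rw [mid_char front 0 0 le_rfl le_rfl]
    set M := front.foldl max 0 with hMdef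
    have hM0 : 0 ≤ M := (PySem.List.le_foldl_max front 0).1
    by_cases hpos : (0 : Int) < M
    · have hmem : M ∈ front := by
        rcases PySem.List.foldl_max_mem front 0 with h1 | h1
        · omega
        · exact h1
      obtain ⟨p, hp⟩ :=
        Option.isSome_iff_exists.mp ((PySem.List.index?_isSome_iff front M).mpr hmem)
      have hslice : PySem.List.slice front (some ((p : Int) + 1)) none = front.drop (p + 1) := by
        rw [show ((p : Int) + 1) = ((p + 1 : Nat) : Int) by push_cast; ring,
            PySem.List.slice_from_natCast]
      rw [if_pos hpos, if_pos hpos, hp]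
      show (if (front.drop (p + 1)).foldl max 0 < z
              then (M, z) else (M, (front.drop (p + 1)).foldl max 0)).1 * 10 +
           (if (front.drop (p + 1)).foldl max 0 < z
              then (M, z) else (M, (front.drop (p + 1)).foldl max 0)).2 =
           M * 10 + (PySem.List.slice front (some ((p : Int) + 1)) none).foldl max (max 0 z)
      rw [hslice, foldl_max_max]
      split_ifs with h
      · simp [max_eq_right (le_of_lt h)]
      · simp [max_eq_left (by omega : z ≤ (front.drop (p + 1)).foldl max 0)]
    · have hMz : M = 0 := by omega
      have hng : ¬ M > 0 := hpos
      rw [if_neg hpos, if_neg hng, foldl_max_max, ← hMdef]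
      show (if M < z then (M, z) else (M, M)).1 * 10 + (if M < z then (M, z) else (M, M)).2 =
           M * 10 + max M z
      split_ifs with h
      · simp [max_eq_right (le_of_lt h)]
      · simp [max_eq_left (by omega : z ≤ M)]
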